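-- pv_equiv track=rewrite | github.com/Cahlil-Togonon/coe_164_capstone | coe164_cp.py | syndromes
-- ===== SOURCE A (Python) =====
-- def pow(base,power):                # power with mod 929 every step
--     result = 1
--     while power:
--         result *= base
--         result %= 929
--         power -= 1
--     return result
--
-- def mult(a,b):                      # mult values with mod 929
--     return (a*b) % 929
--
-- def sum(a,b):                       # sum values with mod 929
--     return (a+b) % 929
--
-- def syndromes(t,SCV):                       # calculate syndromes given t and the SCV
--     S_sum = 0                               # sum of all syndromes
--     S = []                                  # syndromes vector
--     for i in range(1,2*t+1):                # for i = 1 to 2t or E (ecc_count)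
--         Si = 0
--         for j in range(len(SCV)):           # Si = Summation of SCV[j]*x^(n-j), where x = a^i, a = 3
--             Si = sum(Si,mult(SCV[j],pow(3,i*(len(SCV)-1-j))))
--         S_sum = sum(S_sum,Si)               # S_sum = Summation(Si)
--         S.append(Si)
--     return S_sum, S                         # return syndromes sum, syndromes vector
-- ===== SOURCE B (Python) =====
-- def syndromes(t, SCV):
--     # Horner evaluation per syndrome with incremental powers of 3 (mod 929): O(t*n)
--     M = 929
--     S_sum = 0
--     S = []
--     x = 1
--     for _ in range(2 * t):
--         x = (x * 3) % M
--         Si = 0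
--         for c in SCV:
--             Si = (Si * x + c) % M
--         S_sum = (S_sum + Si) % M
--         S.append(Si)
--     return S_sum, S
-- ===== Notes on version B (the rewrite author's own statement) =====
-- stated objective: faster
-- what changed: Each syndrome is evaluated by Horner's rule at an incrementally maintained power of 3 mod 929, instead of recomputing pow(3, i*(n-1-j)) by a linear-time loop for every coefficient.
import Mathlib
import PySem

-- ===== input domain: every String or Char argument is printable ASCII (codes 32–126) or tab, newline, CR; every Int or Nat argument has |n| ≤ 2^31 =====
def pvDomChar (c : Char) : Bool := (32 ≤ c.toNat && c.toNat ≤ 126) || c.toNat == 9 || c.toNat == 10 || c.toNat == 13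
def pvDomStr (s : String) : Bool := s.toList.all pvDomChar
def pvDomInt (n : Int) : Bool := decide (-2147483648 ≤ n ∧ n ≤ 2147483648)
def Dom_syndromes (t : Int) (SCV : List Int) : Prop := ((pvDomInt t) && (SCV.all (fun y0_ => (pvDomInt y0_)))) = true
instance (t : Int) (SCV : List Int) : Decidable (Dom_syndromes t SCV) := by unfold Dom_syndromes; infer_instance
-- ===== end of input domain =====

-- B replaces A's per-coefficient pow(3, i*(n-1-j)) loop by Horner's rule at an
-- incrementally maintained power of 3 mod 929 (objective: faster, asymptotic).

-- ===== PORT A =====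
-- 'while power: result = result*base % 929; power -= 1' run power times
-- (every call in `syndromes` has a nonnegative exponent, so .toNat is exact there)
def powLoopA (base : Int) : Nat → Int
  | 0 => 1
  | n + 1 => PySem.Int.mod (powLoopA base n * base) 929

def powA (base power : Int) : Int := powLoopA base power.toNat

def multA (a b : Int) : Int := PySem.Int.mod (a * b) 929

def sumA (a b : Int) : Int := PySem.Int.mod (a + b) 929

def syndromes (t : Int) (SCV : List Int) : Int × List Int :=
  let n : Int := SCV.length
  (PySem.List.pyRange 1 (2 * t + 1) 1).foldl
    (fun st i =>
      let Si := (PySem.List.pyRange 0 n 1).foldl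
        (fun Si j => sumA Si (multA (PySem.List.pyGetD SCV j 0) (powA 3 (i * (n - 1 - j))))) 0
      (sumA st.1 Si, st.2 ++ [Si]))
    (0, [])

-- ===== PORT B =====
def hornerB (x : Int) (SCV : List Int) : Int :=
  SCV.foldl (fun Si c => PySem.Int.mod (Si * x + c) 929) 0

def stepB (SCV : List Int) (st : Int × Int × List Int) (_i : Int) : Int × Int × List Int :=
  let x := PySem.Int.mod (st.1 * 3) 929
  let Si := hornerB x SCV
  (x, PySem.Int.mod (st.2.1 + Si) 929, st.2.2 ++ [Si])

def syndromes_alt (t : Int) (SCV : List Int) : Int × List Int :=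
  let r := (PySem.List.pyRange 0 (2 * t) 1).foldl (stepB SCV) (1, 0, [])
  (r.2.1, r.2.2)

-- ===== PRECONDITION & SPEC =====
def Spec_syndromes (t : Int) (SCV : List Int) (out : Int × List Int) : Prop := out = syndromes_alt t SCV
instance (t : Int) (SCV : List Int) (out : Int × List Int) : Decidable (Spec_syndromes t SCV out) := by unfold Spec_syndromes; infer_instance

-- ===== CLAIM (what is proved, stated in full; the proofs are below) =====
def Claim_equal_syndromes : Prop := ∀ (t : Int) (SCV : List Int), Dom_syndromes t SCV → Spec_syndromes t SCV (syndromes t SCV)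

-- ===== LEMMAS AND PROOFS =====

theorem mod929_cast (a : Int) : ((PySem.Int.mod a 929 : Int) : ZMod 929) = (a : ZMod 929) := by
  rw [PySem.Int.mod_eq_emod_of_pos (by norm_num : (0:Int) < 929)]
  exact_mod_cast ZMod.intCast_mod a 929

theorem mod929_nonneg (a : Int) : 0 ≤ PySem.Int.mod a 929 :=
  PySem.Int.mod_nonneg a (by norm_num)

theorem mod929_lt (a : Int) : PySem.Int.mod a 929 < 929 :=
  PySem.Int.mod_lt a (by norm_num)

theorem int_eq_of_cast_eq {a b : Int} (ha0 : 0 ≤ a) (ha : a < 929) (hb0 : 0 ≤ b) (hb : b < 929)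
    (h : (a : ZMod 929) = (b : ZMod 929)) : a = b := by
  have := (ZMod.intCast_eq_intCast_iff' a b 929).mp h
  have h1 : a % (929 : Int) = b % (929 : Int) := this
  rwa [Int.emod_eq_of_lt ha0 (by exact_mod_cast ha), Int.emod_eq_of_lt hb0 (by exact_mod_cast hb)] at h1

theorem powLoopA_cast (k : Nat) : ((powLoopA 3 k : Int) : ZMod 929) = (3 : ZMod 929) ^ k := by
  induction k with
  | zero => simp [powLoopA]
  | succ n ih =>
    rw [show powLoopA 3 (n + 1) = PySem.Int.mod (powLoopA 3 n * 3) 929 from rfl,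
      mod929_cast, Int.cast_mul, ih, pow_succ]
    norm_num

-- bounds of any fold whose step always returns a mod-929 value
theorem foldl_bounds {α : Type} (f : Int → α → Int)
    (hf : ∀ s a, 0 ≤ f s a ∧ f s a < 929) :
    ∀ (l : List α) (acc : Int), 0 ≤ acc → acc < 929 →
      0 ≤ l.foldl f acc ∧ l.foldl f acc < 929 := by
  intro l
  induction l with
  | nil => intro acc h0 h1; exact ⟨h0, h1⟩
  | cons c l ih => intro acc _ _; exact ih (f acc c) (hf acc c).1 (hf acc c).2

-- cast of A's inner loop over the first k indices
theorem innerA_cast (SCV : List Int) (i : Nat) :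
    ∀ (k : Nat), k ≤ SCV.length → ∀ (acc : Int),
     ((List.foldl
          (fun Si j => sumA Si (multA (PySem.List.pyGetD SCV j 0)
            (powA 3 ((i : Int) * ((SCV.length : Int) - 1 - j))))) acc
          ((List.range k).map (fun j : Nat => (j : Int))) : Int) : ZMod 929)
        = (acc : ZMod 929)
          + ∑ j ∈ Finset.range k,
              ((SCV.getD j 0 : Int) : ZMod 929) * ((3 : ZMod 929) ^ i) ^ (SCV.length - 1 - j) := by
  intro k
  induction k with
  | zero => intro _ acc; simp
  | succ k ih =>
    intro hk acc
    have hk' : k ≤ SCV.length := by omega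
    rw [List.range_succ, List.map_append, List.foldl_append]
    have hexp : ((i : Int) * ((SCV.length : Int) - 1 - (k : Int))).toNat
        = i * (SCV.length - 1 - k) := by
      have h1 : ((SCV.length : Int) - 1 - (k : Int)) = ((SCV.length - 1 - k : Nat) : Int) := by
        omega
      rw [h1, ← Int.natCast_mul, Int.toNat_natCast]
    have hget : PySem.List.pyGetD SCV (k : Int) 0 = SCV.getD k 0 := by
      simp [PySem.List.pyGetD_natCast]
    have hstep : ∀ S : Int,
        ((sumA S (multA (PySem.List.pyGetD SCV (k : Int) 0)
          (powA 3 ((i : Int) * ((SCV.length : Int) - 1 - (k : Int))))) : Int) : ZMod 929)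
        = (S : ZMod 929)
          + ((SCV.getD k 0 : Int) : ZMod 929) * ((3 : ZMod 929) ^ i) ^ (SCV.length - 1 - k) := by
      intro S
      simp only [sumA, multA, powA]
      rw [mod929_cast, Int.cast_add, mod929_cast, Int.cast_mul, hexp, powLoopA_cast, pow_mul, hget]
    rw [List.map_cons, List.map_nil, List.foldl_cons, List.foldl_nil, hstep, ih hk' acc,
      Finset.sum_range_succ]
    ring

-- cast of B's Horner loop
theorem hornerB_cast (x : Int) (X : ZMod 929) (hx : (x : ZMod 929) = X) :
    ∀ (l : List Int) (acc : Int),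
      ((l.foldl (fun Si c => PySem.Int.mod (Si * x + c) 929) acc : Int) : ZMod 929)
        = (acc : ZMod 929) * X ^ l.length
          + ∑ j ∈ Finset.range l.length, ((l.getD j 0 : Int) : ZMod 929) * X ^ (l.length - 1 - j) := by
  intro l
  induction l with
  | nil => intro acc; simp
  | cons c l ih =>
    intro acc
    rw [List.foldl_cons, ih]
    rw [mod929_cast, Int.cast_add, Int.cast_mul, hx]
    have hsplit : ∑ j ∈ Finset.range (c :: l).length,
        (((c :: l).getD j 0 : Int) : ZMod 929) * X ^ ((c :: l).length - 1 - j)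
        = (c : ZMod 929) * X ^ l.length
          + ∑ j ∈ Finset.range l.length, ((l.getD j 0 : Int) : ZMod 929) * X ^ (l.length - 1 - j) := by
      rw [List.length_cons, Finset.sum_range_succ']
      simp [Nat.sub_sub, add_comm]
    rw [hsplit, List.length_cons, pow_succ]
    ring

-- the two inner loops agree as integers
theorem Si_eq (SCV : List Int) (i : Nat) (x : Int)
    (hx : (x : ZMod 929) = (3 : ZMod 929) ^ i) :
    (PySem.List.pyRange 0 (SCV.length : Int) 1).foldl
      (fun Si j => sumA Si (multA (PySem.List.pyGetD SCV j 0)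
        (powA 3 (i * ((SCV.length : Int) - 1 - j))))) 0
    = hornerB x SCV := by
  have hrange : PySem.List.pyRange 0 (SCV.length : Int) 1
      = (List.range SCV.length).map (fun k : Nat => (k : Int)) := by
    rw [PySem.List.pyRange_one]
    simp
  rw [hrange]
  apply int_eq_of_cast_eq
  · exact (foldl_bounds _ (fun s a => ⟨mod929_nonneg _, mod929_lt _⟩) _ 0 le_rfl (by norm_num)).1
  · exact (foldl_bounds _ (fun s a => ⟨mod929_nonneg _, mod929_lt _⟩) _ 0 le_rfl (by norm_num)).2
  · exact (foldl_bounds _ (fun s a => ⟨mod929_nonneg _, mod929_lt _⟩) _ 0 le_rfl (by norm_num)).1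
  · exact (foldl_bounds _ (fun s a => ⟨mod929_nonneg _, mod929_lt _⟩) _ 0 le_rfl (by norm_num)).2
  · rw [innerA_cast SCV i SCV.length le_rfl 0, hornerB, hornerB_cast x ((3 : ZMod 929) ^ i) hx]
    simp

def stepA (SCV : List Int) (st : Int × List Int) (i : Int) : Int × List Int :=
  let Si := (PySem.List.pyRange 0 (SCV.length : Int) 1).foldl
    (fun Si j => sumA Si (multA (PySem.List.pyGetD SCV j 0)
      (powA 3 (i * ((SCV.length : Int) - 1 - j))))) 0
  (sumA st.1 Si, st.2 ++ [Si])

-- outer loops agree: A walks i = m+1 .. m+len(l); B walks l ignoring elements, tracking x = 3^m mod 929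
theorem outer_eq (SCV : List Int) :
    ∀ (l : List Int) (m : Nat) (x ssum : Int) (acc : List Int),
      0 ≤ x → x < 929 → (x : ZMod 929) = (3 : ZMod 929) ^ m →
      (PySem.List.pyRange ((m : Int) + 1) ((m : Int) + 1 + l.length) 1).foldl (stepA SCV) (ssum, acc)
        = ((l.foldl (stepB SCV) (x, ssum, acc)).2.1, (l.foldl (stepB SCV) (x, ssum, acc)).2.2) := by
  intro l
  induction l with
  | nil =>
    intro m x ssum acc _ _ _
    simp [PySem.List.pyRange_one_eq_nil]
  | cons c l ih =>
    intro m x ssum acc hx0 hx1 hx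
    have hcons : PySem.List.pyRange ((m : Int) + 1) ((m : Int) + 1 + (c :: l).length) 1
        = ((m : Int) + 1) :: PySem.List.pyRange ((m : Int) + 1 + 1) ((m : Int) + 1 + (c :: l).length) 1 := by
      apply PySem.List.pyRange_one_cons
      simp
    rw [hcons, List.foldl_cons, List.foldl_cons]
    set x' := PySem.Int.mod (x * 3) 929 with hx'def
    have hx'cast : (x' : ZMod 929) = (3 : ZMod 929) ^ (m + 1) := by
      rw [hx'def, mod929_cast, Int.cast_mul, hx, pow_succ]
      norm_num
    have hSi : (PySem.List.pyRange 0 (SCV.length : Int) 1).foldl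
        (fun Si j => sumA Si (multA (PySem.List.pyGetD SCV j 0)
          (powA 3 (((m : Int) + 1) * ((SCV.length : Int) - 1 - j))))) 0 = hornerB x' SCV := by
      have hm : ((m : Int) + 1) = ((m + 1 : Nat) : Int) := by push_cast; ring
      rw [hm]
      exact Si_eq SCV (m + 1) x' hx'cast
    have hstepA : stepA SCV (ssum, acc) ((m : Int) + 1)
        = (sumA ssum (hornerB x' SCV), acc ++ [hornerB x' SCV]) := by
      simp only [stepA]
      rw [hSi]
    have hstepB : stepB SCV (x, ssum, acc) c
        = (x', PySem.Int.mod (ssum + hornerB x' SCV) 929, acc ++ [hornerB x' SCV]) := by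
      simp only [stepB]
      rw [← hx'def]
    rw [hstepA, hstepB]
    have harg : (m : Int) + 1 + 1 = ((m + 1 : Nat) : Int) + 1 := by omega
    have harg2 : (m : Int) + 1 + (c :: l).length = ((m + 1 : Nat) : Int) + 1 + l.length := by
      simp [List.length_cons]; ring
    rw [harg, harg2]
    exact ih (m + 1) x' _ _ (mod929_nonneg _) (mod929_lt _) hx'cast

-- ===== VERDICT (by name: the statement is the Claim_ definition above) =====
theorem syndromes_spec : Claim_equal_syndromes := by
  intro t SCV _
  unfold Spec_syndromes syndromes syndromes_alt
  by_cases ht : 2 * t ≤ 0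
  · rw [PySem.List.pyRange_one_eq_nil (by omega), PySem.List.pyRange_one_eq_nil ht]
    simp
  · have ht' : 0 < 2 * t := by omega
    have hlen : ((PySem.List.pyRange 0 (2 * t) 1).length : Int) = 2 * t := by
      rw [PySem.List.length_pyRange_one]; omega
    have h1 : (1 : Int) = ((0 : Nat) : Int) + 1 := by norm_num
    have h2 : (2 * t + 1 : Int)
        = ((0 : Nat) : Int) + 1 + (PySem.List.pyRange 0 (2 * t) 1).length := by
      rw [hlen]; ring
    have hA : (PySem.List.pyRange 1 (2 * t + 1) 1).foldl
          (fun st i =>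
            let Si := (PySem.List.pyRange 0 ((SCV.length : Int)) 1).foldl
              (fun Si j => sumA Si (multA (PySem.List.pyGetD SCV j 0)
                (powA 3 (i * ((SCV.length : Int) - 1 - j))))) 0
            (sumA st.1 Si, st.2 ++ [Si])) (0, [])
        = (PySem.List.pyRange (((0 : Nat) : Int) + 1)
            (((0 : Nat) : Int) + 1 + (PySem.List.pyRange 0 (2 * t) 1).length) 1).foldl
            (stepA SCV) (0, []) := by
      rw [← h2, ← h1]
      rfl
    rw [hA, outer_eq SCV (PySem.List.pyRange 0 (2 * t) 1) 0 1 0 [] (by norm_num) (by norm_num)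
      (by norm_num)]
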